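-- pv_equiv track=rewrite | github.com/MiyakoMeow/bms-resource-toolbox | bms/__init__.py | _extract_work_name_post_process
-- ===== SOURCE A (Python) =====
-- from typing import Any, Dict, List, Optional, Tuple
--
-- def _extract_work_name_post_process(
--     s: str, remove_unclosed_pair: bool = True, remove_tailing_sign_list: List[str] = []
-- ) -> str:
--     """
--     后处理函数：移除未闭合括号及其后续内容
--
--     :param s: 原始字符串
--     :return: 处理后的字符串
--     """
--
--     # 清除前后空格
--     s = s.strip()
--
--     while True:
--         triggered = False
--         if remove_unclosed_pair:
--             stack: List[Tuple[str, int]] = []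
--
--             # 遍历字符串记录括号状态
--             pairs = [
--                 ("(", ")"),
--                 ("[", "]"),
--                 ("{", "}"),
--                 ("（", "）"),
--                 ("［", "］"),
--                 ("｛", "｝"),
--                 ("【", "】"),
--             ]
--             for i, c in enumerate(s):
--                 for p_open, p_close in pairs:
--                     if c == p_open:
--                         stack.append((c, i))  # 记录括号类型和位置
--                     if c == p_close and stack and stack[-1][0] == p_open:
--                         stack.pop()
--
--             # 如果存在未闭合括号
--             if stack:
--                 last_unmatched_pos = stack[-1][1]
--                 s = s[:last_unmatched_pos].rstrip()  # 截断并移除末尾空格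
--                 triggered = True
--
--         for sign in remove_tailing_sign_list:
--             if s.endswith(sign):
--                 s = s[: -len(sign)].rstrip()
--                 triggered = True
--         # 没触发？
--         if not triggered:
--             break
--
--     return s
-- ===== SOURCE B (Python) =====
-- def _extract_work_name_post_process(
--     s: str, remove_unclosed_pair: bool = True, remove_tailing_sign_list=[]
-- ) -> str:
--     # One bracket-matching scan up front; the trim loop then works on a prefix
--     # length L of the stripped string instead of rescanning/rebuilding strings each round.
--     base = s.strip()
--     n = len(base)
--     _OPEN = "([{（［｛【"
--     _CLOSE = ")]}）］｝】"
--     # single pass: (open_pos, close_pos) for every open bracket; close_pos = n when unclosed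
--     pairs = []
--     stack = []  # (char, pos) of still-open brackets
--     for i, c in enumerate(base):
--         if c in _OPEN:
--             stack.append((c, i))
--         elif c in _CLOSE and stack and stack[-1][0] == _OPEN[_CLOSE.index(c)]:
--             pairs.append((stack.pop()[1], i))
--     pairs.extend((p, n) for _, p in stack)
--     # invariant: the current string is always base[:L]
--     L = n
--     while True:
--         triggered = False
--         if remove_unclosed_pair:
--             # an open bracket is unclosed in base[:L] iff pos < L <= close_pos
--             p = max((p for p, c in pairs if p < L <= c), default=None)
--             if p is not None:
--                 L = p
--                 while L > 0 and base[L - 1].isspace():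
--                     L -= 1
--                 triggered = True
--         for sign in remove_tailing_sign_list:
--             if base.endswith(sign, 0, L):
--                 L -= len(sign)
--                 while L > 0 and base[L - 1].isspace():
--                     L -= 1
--                 triggered = True
--         if not triggered:
--             break
--     return base[:L]
-- ===== Notes on version B (the rewrite author's own statement) =====
-- stated objective: faster
-- what changed: A rescans the whole string with a 7-pair inner loop and rebuilds sliced/rstripped string copies on every round of the trim loop; B runs one bracket-matching scan up front to get (open,close) index pairs and then runs the trim loop purely on a prefix length L of the stripped string, finding each truncation point as max{p : p < L <= close(p)} over the precomputed pairs.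
import Mathlib
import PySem

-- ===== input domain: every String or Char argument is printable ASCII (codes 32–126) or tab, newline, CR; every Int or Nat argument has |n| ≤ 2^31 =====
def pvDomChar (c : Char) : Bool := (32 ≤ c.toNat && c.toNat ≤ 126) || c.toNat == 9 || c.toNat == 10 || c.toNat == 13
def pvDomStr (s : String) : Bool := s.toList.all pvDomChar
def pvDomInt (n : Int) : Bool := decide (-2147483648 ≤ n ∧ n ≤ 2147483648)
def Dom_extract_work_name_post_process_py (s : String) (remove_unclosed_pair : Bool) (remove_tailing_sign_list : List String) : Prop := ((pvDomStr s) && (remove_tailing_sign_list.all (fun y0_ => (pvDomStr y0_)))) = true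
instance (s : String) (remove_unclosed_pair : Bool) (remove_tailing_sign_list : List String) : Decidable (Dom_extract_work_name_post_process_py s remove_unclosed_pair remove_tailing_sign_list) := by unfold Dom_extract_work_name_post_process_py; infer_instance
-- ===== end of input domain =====

-- B replaces A's per-round full bracket rescans by one up-front bracket-matching
-- scan and a trim loop over prefix lengths of the stripped string (faster by the
-- measured check's timing run on bracket-heavy inputs; same return value).


-- ===== PORT A =====

-- the `pairs` list of the Python
def pvPairsA : List (Char × Char) :=
  [('(', ')'), ('[', ']'), ('{', '}'), ('（', '）'), ('［', '］'), ('｛', '｝'), ('【', '】')]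

-- body of `for p_open, p_close in pairs:` for one character (c, i) of enumerate(s)
def pvStepA (stack : List (Char × Int)) (i : Int) (c : Char) : List (Char × Int) :=
  pvPairsA.foldl (fun st pc =>
    let st1 := if c = pc.1 then st ++ [(c, i)] else st
    -- `if c == p_close and stack and stack[-1][0] == p_open: stack.pop()`
    if c = pc.2 ∧ st1.getLast?.any (fun top => top.1 = pc.1) then st1.dropLast else st1) stack

-- `for i, c in enumerate(s): ...`
def pvScanA (u : List Char) : List (Char × Int) :=
  (PySem.List.enumerate u 0).foldl (fun st ic => pvStepA st ic.1 ic.2) []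

-- body of `for sign in remove_tailing_sign_list:`
def pvSignStepA (st : List Char × Bool) (sign : String) : List Char × Bool :=
  if PySem.Chars.endswith st.1 sign.toList then
    (PySem.Chars.rstrip (PySem.List.slice st.1 none (some (-(PySem.Str.len sign : Int)))), true)
  else st

-- bracket phase of one round: `if remove_unclosed_pair: ... if stack: ...`
def pvBrA (rup : Bool) (u : List Char) : List Char × Bool :=
  if rup then
    match (pvScanA u).getLast? with
    | some top => (PySem.Chars.rstrip (PySem.List.slice u none (some top.2)), true)
    | none => (u, false)
  else (u, false)

-- `while True:` loop; fuel = (len + 1) is enough whenever the Python terminates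
def pvLoopA (rup : Bool) (signs : List String) : Nat → List Char → List Char
  | 0, u => u
  | fuel + 1, u =>
    if (signs.foldl pvSignStepA (pvBrA rup u)).2 then
      pvLoopA rup signs fuel (signs.foldl pvSignStepA (pvBrA rup u)).1
    else (signs.foldl pvSignStepA (pvBrA rup u)).1

def extract_work_name_post_process_py (s : String) (remove_unclosed_pair : Bool)
    (remove_tailing_sign_list : List String) : String :=
  let t := PySem.Chars.strip s.toList
  String.ofList (pvLoopA remove_unclosed_pair remove_tailing_sign_list (t.length + 1) t)

-- ===== PORT B =====

def pvOpensB : List Char := ['(', '[', '{', '（', '［', '｛', '【']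
def pvClosesB : List Char := [')', ']', '}', '）', '］', '｝', '】']

-- one character of B's single matching scan; state = (pairs, stack)
def pvStepB (st : List (Nat × Nat) × List (Char × Nat)) (i : Nat) (c : Char) :
    List (Nat × Nat) × List (Char × Nat) :=
  if pvOpensB.contains c then
    (st.1, st.2 ++ [(c, i)])
  else if pvClosesB.contains c then
    match st.2.getLast? with
    | some top =>
      if some top.1 = pvOpensB[pvClosesB.idxOf c]? then
        (st.1 ++ [(top.2, i)], st.2.dropLast)
      else st
    | none => st
  else st

def pvScanB (i : Nat) (cs : List Char) (st : List (Nat × Nat) × List (Char × Nat)) :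
    List (Nat × Nat) × List (Char × Nat) :=
  match cs with
  | [] => st
  | c :: rest => pvScanB (i + 1) rest (pvStepB st i c)

-- `while L > 0 and base[L-1].isspace(): L -= 1` (base[L-1] is in bounds there)
def pvRstripLen (t : List Char) : Nat → Nat
  | 0 => 0
  | L + 1 => if PySem.Chars.isspace (t.getD L ' ') then pvRstripLen t L else L + 1

-- `base.endswith(sign, 0, L)` = base[:L].endswith(sign): exact since 0 ≤ L ≤ len(base)
def pvSignStepB (t : List Char) (st : Nat × Bool) (sign : String) : Nat × Bool :=
  if PySem.Chars.endswith (t.take st.1) sign.toList then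
    (pvRstripLen t (st.1 - sign.toList.length), true)
  else st

-- bracket phase of one round: truncate at the largest unclosed open position
def pvBrB (t : List Char) (pairs : List (Nat × Nat)) (rup : Bool) (L : Nat) : Nat × Bool :=
  if rup then
    match ((pairs.filter (fun pc => pc.1 < L && L ≤ pc.2)).map (·.1)).max? with
    | some p => (pvRstripLen t p, true)
    | none => (L, false)
  else (L, false)

def pvLoopB (t : List Char) (pairs : List (Nat × Nat)) (rup : Bool) (signs : List String) :
    Nat → Nat → Nat
  | 0, L => L
  | fuel + 1, L =>
    if (signs.foldl (pvSignStepB t) (pvBrB t pairs rup L)).2 then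
      pvLoopB t pairs rup signs fuel (signs.foldl (pvSignStepB t) (pvBrB t pairs rup L)).1
    else (signs.foldl (pvSignStepB t) (pvBrB t pairs rup L)).1

def extract_work_name_post_process_py_alt (s : String) (remove_unclosed_pair : Bool)
    (remove_tailing_sign_list : List String) : String :=
  let t := PySem.Chars.strip s.toList
  let st := pvScanB 0 t ([], [])
  let pairs := st.1 ++ st.2.map (fun cp => (cp.2, t.length))
  String.ofList (t.take
    (pvLoopB t pairs remove_unclosed_pair remove_tailing_sign_list (t.length + 1) t.length))

-- ===== PRECONDITION & SPEC =====
-- Pre_ excludes an empty string among the tail signs: there `s.endswith("")` is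
-- always true, the while-loop re-triggers forever and the Python A never returns.
def Pre_extract_work_name_post_process_py (s : String) (remove_unclosed_pair : Bool)
    (remove_tailing_sign_list : List String) : Prop :=
  "" ∉ remove_tailing_sign_list
instance (s : String) (remove_unclosed_pair : Bool) (remove_tailing_sign_list : List String) :
    Decidable (Pre_extract_work_name_post_process_py s remove_unclosed_pair remove_tailing_sign_list) := by
  unfold Pre_extract_work_name_post_process_py; infer_instance

def pvWitness_extract_work_name_post_process_py : String × Bool × List String :=
  ("foo (bar -", true, [" -"])

def Spec_extract_work_name_post_process_py (s : String) (remove_unclosed_pair : Bool)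
    (remove_tailing_sign_list : List String) (out : String) : Prop :=
  out = extract_work_name_post_process_py_alt s remove_unclosed_pair remove_tailing_sign_list
instance (s : String) (remove_unclosed_pair : Bool) (remove_tailing_sign_list : List String) (out : String) :
    Decidable (Spec_extract_work_name_post_process_py s remove_unclosed_pair remove_tailing_sign_list out) := by
  unfold Spec_extract_work_name_post_process_py; infer_instance

-- ===== CLAIM (what is proved, stated in full; the proofs are below) =====
def Claim_equal_extract_work_name_post_process_py : Prop := ∀ (s : String) (remove_unclosed_pair : Bool) (remove_tailing_sign_list : List String), Dom_extract_work_name_post_process_py s remove_unclosed_pair remove_tailing_sign_list → Pre_extract_work_name_post_process_py s remove_unclosed_pair remove_tailing_sign_list → Spec_extract_work_name_post_process_py s remove_unclosed_pair remove_tailing_sign_list (extract_work_name_post_process_py s remove_unclosed_pair remove_tailing_sign_list)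

-- ===== LEMMAS AND PROOFS =====

-- cast of B's stack entries to A's representation
def pvCastS (S : List (Char × Nat)) : List (Char × Int) :=
  S.map (fun cp => (cp.1, (cp.2 : Int)))

-- close the scan: B's final pairs list (state st, total length n)
def pvFP (n : Nat) (st : List (Nat × Nat) × List (Char × Nat)) : List (Nat × Nat) :=
  st.1 ++ st.2.map (fun cp => (cp.2, n))

-- the four evaluation shapes of pvStepB
lemma pvStepB_open {P : List (Nat × Nat)} {S : List (Char × Nat)} {i : Nat} {c : Char}
    (ho : pvOpensB.contains c = true) : pvStepB (P, S) i c = (P, S ++ [(c, i)]) := by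
  have ho' : c ∈ pvOpensB := by simpa using ho
  simp [pvStepB, ho']

lemma pvStepB_pop {P : List (Nat × Nat)} {S : List (Char × Nat)} {i : Nat} {c : Char}
    {top : Char × Nat}
    (ho : ¬ pvOpensB.contains c = true) (hcl : pvClosesB.contains c = true)
    (hS : S.getLast? = some top) (hm : some top.1 = pvOpensB[pvClosesB.idxOf c]?) :
    pvStepB (P, S) i c = (P ++ [(top.2, i)], S.dropLast) := by
  have ho' : c ∉ pvOpensB := by simpa using ho
  have hcl' : c ∈ pvClosesB := by simpa using hcl
  simp [pvStepB, ho', hcl', hS, ← hm]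

lemma pvStepB_id_nomatch {P : List (Nat × Nat)} {S : List (Char × Nat)} {i : Nat} {c : Char}
    {top : Char × Nat}
    (ho : ¬ pvOpensB.contains c = true) (hcl : pvClosesB.contains c = true)
    (hS : S.getLast? = some top) (hm : ¬ some top.1 = pvOpensB[pvClosesB.idxOf c]?) :
    pvStepB (P, S) i c = (P, S) := by
  have ho' : c ∉ pvOpensB := by simpa using ho
  have hcl' : c ∈ pvClosesB := by simpa using hcl
  simp [pvStepB, ho', hcl', hS, hm]

lemma pvStepB_id_none {P : List (Nat × Nat)} {S : List (Char × Nat)} {i : Nat} {c : Char}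
    (ho : ¬ pvOpensB.contains c = true) (hcl : pvClosesB.contains c = true)
    (hS : S.getLast? = none) :
    pvStepB (P, S) i c = (P, S) := by
  have ho' : c ∉ pvOpensB := by simpa using ho
  have hcl' : c ∈ pvClosesB := by simpa using hcl
  simp [pvStepB, ho', hcl', hS]

lemma pvStepB_id_other {P : List (Nat × Nat)} {S : List (Char × Nat)} {i : Nat} {c : Char}
    (ho : ¬ pvOpensB.contains c = true) (hcl : ¬ pvClosesB.contains c = true) :
    pvStepB (P, S) i c = (P, S) := by
  have ho' : c ∉ pvOpensB := by simpa using ho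
  have hcl' : c ∉ pvClosesB := by simpa using hcl
  simp [pvStepB, ho', hcl']

lemma pvStep_sim (P : List (Nat × Nat)) (S : List (Char × Nat)) (i : Nat) (c : Char) :
    pvStepA (pvCastS S) (i : Int) c = pvCastS (pvStepB (P, S) i c).2 := by
  by_cases ho : pvOpensB.contains c
  · rw [pvStepB_open ho]
    simp only [pvOpensB, List.contains_eq_mem, List.mem_cons, List.not_mem_nil, or_false,
      decide_eq_true_eq] at ho
    rcases ho with rfl|rfl|rfl|rfl|rfl|rfl|rfl <;>
      simp [pvStepA, pvPairsA, pvCastS, List.getLast?_concat]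
  · by_cases hcl : pvClosesB.contains c
    · cases hS : S.getLast? with
      | none =>
        rw [pvStepB_id_none ho hcl hS]
        simp only [pvClosesB, List.contains_eq_mem, List.mem_cons, List.not_mem_nil, or_false,
          decide_eq_true_eq] at hcl
        rcases hcl with rfl|rfl|rfl|rfl|rfl|rfl|rfl <;>
          simp [pvStepA, pvPairsA, pvCastS, List.getLast?_map, hS]
      | some top =>
        by_cases hm : some top.1 = pvOpensB[pvClosesB.idxOf c]?
        · rw [pvStepB_pop ho hcl hS hm]
          simp only [pvClosesB, List.contains_eq_mem, List.mem_cons, List.not_mem_nil, or_false,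
            decide_eq_true_eq] at hcl
          rcases hcl with rfl|rfl|rfl|rfl|rfl|rfl|rfl <;>
            (simp [pvOpensB, pvClosesB] at hm;
             simp [pvStepA, pvPairsA, pvCastS, List.getLast?_map, hS, hm, List.map_dropLast])
        · rw [pvStepB_id_nomatch ho hcl hS hm]
          simp only [pvClosesB, List.contains_eq_mem, List.mem_cons, List.not_mem_nil, or_false,
            decide_eq_true_eq] at hcl
          rcases hcl with rfl|rfl|rfl|rfl|rfl|rfl|rfl <;>
            (simp [pvOpensB, pvClosesB] at hm;
             simp [pvStepA, pvPairsA, pvCastS, List.getLast?_map, hS, hm])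
    · rw [pvStepB_id_other ho hcl]
      simp only [pvOpensB, List.contains_eq_mem, List.mem_cons, List.not_mem_nil, or_false,
        decide_eq_true_eq, not_or] at ho
      simp only [pvClosesB, List.contains_eq_mem, List.mem_cons, List.not_mem_nil, or_false,
        decide_eq_true_eq, not_or] at hcl
      obtain ⟨h1,h2,h3,h4,h5,h6,h7⟩ := ho
      obtain ⟨g1,g2,g3,g4,g5,g6,g7⟩ := hcl
      simp [pvStepA, pvPairsA, pvCastS, h1,h2,h3,h4,h5,h6,h7,g1,g2,g3,g4,g5,g6,g7]

lemma pvScan_sim : ∀ (cs : List Char) (i : Nat) (P : List (Nat × Nat)) (S : List (Char × Nat)),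
    (PySem.List.enumerate cs (i : Int)).foldl (fun st ic => pvStepA st ic.1 ic.2) (pvCastS S)
      = pvCastS (pvScanB i cs (P, S)).2 := by
  intro cs
  induction cs with
  | nil => intro i P S; simp [pvScanB, PySem.List.enumerate_nil]
  | cons c rest ih =>
    intro i P S
    rw [PySem.List.enumerate_cons]
    simp only [List.foldl_cons, pvScanB]
    rw [pvStep_sim P S i c]
    have hcast : ((i : Int) + 1) = ((i + 1 : Nat) : Int) := by push_cast; ring
    rw [hcast]
    have := ih (i + 1) (pvStepB (P, S) i c).1 (pvStepB (P, S) i c).2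
    simpa using this

lemma pvScanA_eq (u : List Char) :
    pvScanA u = pvCastS (pvScanB 0 u ([], [])).2 := by
  have := pvScan_sim u 0 [] []
  simpa [pvScanA, pvCastS] using this

lemma pvScanB_append : ∀ (xs ys : List Char) (i : Nat) (st : List (Nat × Nat) × List (Char × Nat)),
    pvScanB i (xs ++ ys) st = pvScanB (i + xs.length) ys (pvScanB i xs st) := by
  intro xs
  induction xs with
  | nil => intro ys i st; simp [pvScanB]
  | cons c rest ih =>
    intro ys i st
    simp only [List.cons_append, pvScanB, ih, List.length_cons]
    congr 1
    omega

lemma pvScanB_inv : ∀ (cs : List Char) (i : Nat) (P : List (Nat × Nat)) (S : List (Char × Nat)),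
    (∀ pq ∈ P, pq.2 < i) → (∀ cp ∈ S, cp.2 < i) → ((S.map (·.2)).Pairwise (· < ·)) →
    (∀ pq ∈ (pvScanB i cs (P, S)).1, pq.2 < i + cs.length)
      ∧ (∀ cp ∈ (pvScanB i cs (P, S)).2, cp.2 < i + cs.length)
      ∧ (((pvScanB i cs (P, S)).2.map (·.2)).Pairwise (· < ·)) := by
  intro cs
  induction cs with
  | nil =>
    intro i P S h1 h2 h3
    simp only [pvScanB, List.length_nil, Nat.add_zero]
    exact ⟨h1, h2, h3⟩
  | cons c rest ih =>
    intro i P S h1 h2 h3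
    simp only [pvScanB, List.length_cons]
    have key : (∀ pq ∈ (pvStepB (P, S) i c).1, pq.2 < i + 1)
        ∧ (∀ cp ∈ (pvStepB (P, S) i c).2, cp.2 < i + 1)
        ∧ (((pvStepB (P, S) i c).2.map (·.2)).Pairwise (· < ·)) := by
      by_cases ho : pvOpensB.contains c
      · rw [pvStepB_open ho]
        refine ⟨fun pq h => by have := h1 pq h; omega, ?_, ?_⟩
        · intro cp hcp
          rcases List.mem_append.mp hcp with h | h
          · have := h2 cp h; omega
          · simp at h; subst h; simp
        · simp only [List.map_append, List.map_cons, List.map_nil]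
          rw [List.pairwise_append]
          refine ⟨h3, by simp, ?_⟩
          intro a ha b hb
          simp at hb
          subst hb
          rcases List.mem_map.mp ha with ⟨cp, hcp, rfl⟩
          exact h2 cp hcp
      · by_cases hcl : pvClosesB.contains c
        · cases hS : S.getLast? with
          | none =>
            rw [pvStepB_id_none ho hcl hS]
            exact ⟨fun pq h => by have := h1 pq h; omega,
              fun cp h => by have := h2 cp h; omega, h3⟩
          | some top =>
            by_cases hm : some top.1 = pvOpensB[pvClosesB.idxOf c]?
            · rw [pvStepB_pop ho hcl hS hm]
              have hne : S ≠ [] := by intro h; rw [h] at hS; simp at hS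
              have htop : top ∈ S := by
                have := List.getLast?_eq_getLast hne
                rw [hS] at this
                rw [Option.some.inj this]
                exact List.getLast_mem hne
              refine ⟨?_, ?_, ?_⟩
              · intro pq hpq
                rcases List.mem_append.mp hpq with h | h
                · have := h1 pq h; omega
                · simp at h
                  subst h
                  have := h2 top htop
                  simpa using this
              · intro cp hcp
                have : cp ∈ S := List.dropLast_subset _ hcp
                have := h2 cp this; omega
              · rw [List.map_dropLast]
                exact h3.sublist (List.dropLast_sublist _)
            · rw [pvStepB_id_nomatch ho hcl hS hm]
              exact ⟨fun pq h => by have := h1 pq h; omega,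
                fun cp h => by have := h2 cp h; omega, h3⟩
        · rw [pvStepB_id_other ho hcl]
          exact ⟨fun pq h => by have := h1 pq h; omega,
            fun cp h => by have := h2 cp h; omega, h3⟩
    have main := ih (i + 1) (pvStepB (P, S) i c).1 (pvStepB (P, S) i c).2 key.1 key.2.1 key.2.2
    simp only [Prod.mk.eta] at main
    refine ⟨fun pq h => ?_, fun cp h => ?_, main.2.2⟩
    · have := main.1 pq h; omega
    · have := main.2.1 cp h; omega

lemma pvRun : ∀ (cs : List Char) (i : Nat) (P : List (Nat × Nat)) (S : List (Char × Nat)) (n : Nat),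
    i + cs.length = n →
    ∃ R, pvFP n (pvScanB i cs (P, S)) = P ++ R
      ∧ (∀ pq ∈ R, i ≤ pq.2)
      ∧ (∀ pq ∈ R, (∃ cp ∈ S, cp.2 = pq.1) ∨ i ≤ pq.1)
      ∧ (∀ cp ∈ S, ∃ q, (cp.2, q) ∈ R) := by
  intro cs
  induction cs with
  | nil =>
    intro i P S n hn
    refine ⟨S.map (fun cp => (cp.2, n)), by simp [pvScanB, pvFP], ?_, ?_, ?_⟩
    · intro pq hpq
      rcases List.mem_map.mp hpq with ⟨cp, _, rfl⟩
      simp at hn ⊢; omega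
    · intro pq hpq
      rcases List.mem_map.mp hpq with ⟨cp, hcp, rfl⟩
      exact Or.inl ⟨cp, hcp, rfl⟩
    · intro cp hcp
      exact ⟨n, List.mem_map.mpr ⟨cp, hcp, rfl⟩⟩
  | cons c rest ih =>
    intro i P S n hn
    have hn' : (i + 1) + rest.length = n := by simp at hn; omega
    simp only [pvScanB]
    by_cases ho : pvOpensB.contains c
    · rw [pvStepB_open ho]
      obtain ⟨R, hR, hp1, hp2, hp3⟩ := ih (i + 1) P (S ++ [(c, i)]) n hn'
      refine ⟨R, hR, fun pq h => by have := hp1 pq h; omega, ?_, ?_⟩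
      · intro pq h
        rcases hp2 pq h with ⟨cp, hcp, he⟩ | h'
        · rcases List.mem_append.mp hcp with h'' | h''
          · exact Or.inl ⟨cp, h'', he⟩
          · simp at h''; subst h''; simp at he; right; omega
        · right; omega
      · intro cp hcp
        exact hp3 cp (List.mem_append.mpr (Or.inl hcp))
    · by_cases hcl : pvClosesB.contains c
      · cases hS : S.getLast? with
        | none =>
          rw [pvStepB_id_none ho hcl hS]
          obtain ⟨R, hR, hp1, hp2, hp3⟩ := ih (i + 1) P S n hn'
          exact ⟨R, hR, fun pq h => by have := hp1 pq h; omega,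
            fun pq h => (hp2 pq h).imp id (fun h' => by omega), hp3⟩
        | some top =>
          by_cases hm : some top.1 = pvOpensB[pvClosesB.idxOf c]?
          · rw [pvStepB_pop ho hcl hS hm]
            obtain ⟨R, hR, hp1, hp2, hp3⟩ := ih (i + 1) (P ++ [(top.2, i)]) S.dropLast n hn'
            have hne : S ≠ [] := by intro h; rw [h] at hS; simp at hS
            have htop : top = S.getLast hne := by
              have := List.getLast?_eq_getLast hne
              rw [hS] at this
              exact Option.some.inj this
            have hSd : S.dropLast ++ [top] = S := by
              rw [htop]; exact List.dropLast_append_getLast hne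
            refine ⟨(top.2, i) :: R, ?_, ?_, ?_, ?_⟩
            · rw [hR, List.append_assoc]; rfl
            · intro pq hpq
              rcases List.mem_cons.mp hpq with rfl | h
              · simp
              · have := hp1 pq h; omega
            · intro pq hpq
              rcases List.mem_cons.mp hpq with rfl | h
              · left
                refine ⟨top, ?_, rfl⟩
                rw [← hSd]; simp
              · rcases hp2 pq h with ⟨cp, hcp, he⟩ | h'
                · left
                  exact ⟨cp, by rw [← hSd]; exact List.mem_append.mpr (Or.inl hcp), he⟩
                · right; omega
            · intro cp hcp
              rw [← hSd] at hcp
              rcases List.mem_append.mp hcp with h | h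
              · obtain ⟨q, hq⟩ := hp3 cp h
                exact ⟨q, List.mem_cons.mpr (Or.inr hq)⟩
              · simp at h
                subst h
                exact ⟨i, List.mem_cons.mpr (Or.inl rfl)⟩
          · rw [pvStepB_id_nomatch ho hcl hS hm]
            obtain ⟨R, hR, hp1, hp2, hp3⟩ := ih (i + 1) P S n hn'
            exact ⟨R, hR, fun pq h => by have := hp1 pq h; omega,
              fun pq h => (hp2 pq h).imp id (fun h' => by omega), hp3⟩
      · rw [pvStepB_id_other ho hcl]
        obtain ⟨R, hR, hp1, hp2, hp3⟩ := ih (i + 1) P S n hn'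
        exact ⟨R, hR, fun pq h => by have := hp1 pq h; omega,
          fun pq h => (hp2 pq h).imp id (fun h' => by omega), hp3⟩

lemma pvLast_max {l : List Nat} (hp : l.Pairwise (· < ·)) {m : Nat}
    (hm : l.getLast? = some m) : ∀ x ∈ l, x ≤ m := by
  have hne : l ≠ [] := by intro h; subst h; simp at hm
  have hm' : m = l.getLast hne := by
    have := List.getLast?_eq_some_getLast hne
    rw [hm] at this
    exact Option.some.inj this
  have hd : l.dropLast ++ [l.getLast hne] = l := List.dropLast_append_getLast hne
  intro x hx
  rw [← hd] at hx hp
  rcases List.mem_append.mp hx with h | h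
  · have := (List.pairwise_append.mp hp).2.2 x h (l.getLast hne) (by simp)
    omega
  · simp at h; omega

lemma pvMem (t : List Char) (L : Nat) (hL : L ≤ t.length) (p : Nat) :
    (∃ cp ∈ (pvScanB 0 (t.take L) ([], [])).2, cp.2 = p)
      ↔ p < L ∧ ∃ q, (p, q) ∈ pvFP t.length (pvScanB 0 t ([], [])) ∧ L ≤ q := by
  have hlen : (t.take L).length = L := by simp [Nat.min_eq_left hL]
  have hsplit : pvScanB 0 t ([], []) = pvScanB L (t.drop L)
      ((pvScanB 0 (t.take L) ([], [])).1, (pvScanB 0 (t.take L) ([], [])).2) := by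
    have := pvScanB_append (t.take L) (t.drop L) 0 ([], [])
    simpa [List.take_append_drop, hlen] using this
  have hinv := pvScanB_inv (t.take L) 0 [] [] (by simp) (by simp) (by simp)
  rw [hlen] at hinv
  obtain ⟨R, hR, hr1, hr2, hr3⟩ := pvRun (t.drop L) L (pvScanB 0 (t.take L) ([], [])).1
    (pvScanB 0 (t.take L) ([], [])).2 t.length (by simp [List.length_drop]; omega)
  rw [← hsplit] at hR
  constructor
  · rintro ⟨cp, hcp, rfl⟩
    obtain ⟨q, hq⟩ := hr3 cp hcp
    refine ⟨by simpa using hinv.2.1 cp hcp, q, ?_, hr1 (cp.2, q) hq⟩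
    rw [hR]
    exact List.mem_append.mpr (Or.inr hq)
  · rintro ⟨hpL, q, hqF, hLq⟩
    rw [hR] at hqF
    rcases List.mem_append.mp hqF with h | h
    · have := hinv.1 (p, q) h
      simp at this
      omega
    · rcases hr2 (p, q) h with ⟨cp, hcp, he⟩ | h'
      · exact ⟨cp, hcp, he⟩
      · omega

lemma pvMax (t : List Char) (L : Nat) (hL : L ≤ t.length) :
    (((pvFP t.length (pvScanB 0 t ([], []))).filter
        (fun pc => pc.1 < L && L ≤ pc.2)).map (·.1)).max?
      = ((pvScanB 0 (t.take L) ([], [])).2.getLast?).map (·.2) := by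
  have hlen : (t.take L).length = L := by simp [Nat.min_eq_left hL]
  have hinv := pvScanB_inv (t.take L) 0 [] [] (by simp) (by simp) (by simp)
  rw [hlen] at hinv
  cases hS : (pvScanB 0 (t.take L) ([], [])).2.getLast? with
  | none =>
    have hSnil : (pvScanB 0 (t.take L) ([], [])).2 = [] := List.getLast?_eq_none_iff.mp hS
    have hnil : (((pvFP t.length (pvScanB 0 t ([], []))).filter
        (fun pc => pc.1 < L && L ≤ pc.2)).map (·.1)) = [] := by
      apply List.eq_nil_iff_forall_not_mem.mpr
      intro x hx
      obtain ⟨pc, hpc, rfl⟩ := List.mem_map.mp hx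
      have hf := List.mem_filter.mp hpc
      have hcond : pc.1 < L ∧ L ≤ pc.2 := by
        have := hf.2; simp at this; exact this
      obtain ⟨cp, hcp, _⟩ := (pvMem t L hL pc.1).mpr ⟨hcond.1, pc.2, hf.1, hcond.2⟩
      rw [hSnil] at hcp
      simp at hcp
    rw [hnil]
    simp
  | some top =>
    have hne : (pvScanB 0 (t.take L) ([], [])).2 ≠ [] := by
      intro h; rw [h] at hS; simp at hS
    have htopmem : top ∈ (pvScanB 0 (t.take L) ([], [])).2 := by
      have := List.getLast?_eq_some_getLast hne
      rw [hS] at this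
      rw [Option.some.inj this]
      exact List.getLast_mem hne
    simp only [Option.map_some]
    rw [List.max?_eq_some_iff]
    constructor
    · obtain ⟨hpl, q, hqF, hLq⟩ := (pvMem t L hL top.2).mp ⟨top, htopmem, rfl⟩
      apply List.mem_map.mpr
      refine ⟨(top.2, q), List.mem_filter.mpr ⟨hqF, by simp; omega⟩, rfl⟩
    · intro x hx
      obtain ⟨pc, hpc, rfl⟩ := List.mem_map.mp hx
      have hf := List.mem_filter.mp hpc
      have hcond : pc.1 < L ∧ L ≤ pc.2 := by have := hf.2; simp at this; exact this
      obtain ⟨cp, hcp, he⟩ := (pvMem t L hL pc.1).mpr ⟨hcond.1, pc.2, hf.1, hcond.2⟩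
      have hlast : ((pvScanB 0 (t.take L) ([], [])).2.map (·.2)).getLast? = some top.2 := by
        rw [List.getLast?_map, hS]; rfl
      have := pvLast_max hinv.2.2 hlast cp.2 (List.mem_map.mpr ⟨cp, hcp, rfl⟩)
      omega

lemma pvRstripLen_le (t : List Char) : ∀ m, pvRstripLen t m ≤ m := by
  intro m
  induction m with
  | zero => simp [pvRstripLen]
  | succ m ih =>
    unfold pvRstripLen
    split_ifs
    · omega
    · omega

lemma pvRstrip_take (t : List Char) : ∀ m, m ≤ t.length →
    PySem.Chars.rstrip (t.take m) = t.take (pvRstripLen t m) := by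
  intro m
  induction m with
  | zero => intro _; simp [pvRstripLen, PySem.Chars.rstrip]
  | succ m ih =>
    intro hm
    have hmlt : m < t.length := by omega
    have htake : t.take (m + 1) = t.take m ++ [t[m]] := by
      rw [List.take_succ]
      simp [List.getElem?_eq_getElem hmlt]
    have hgetD : t.getD m ' ' = t[m] := by
      simp [List.getD_eq_getElem?_getD, List.getElem?_eq_getElem hmlt]
    unfold pvRstripLen
    by_cases hsp : PySem.Chars.isspace t[m]
    · rw [if_pos (by rw [hgetD]; exact hsp)]
      rw [← ih (by omega)]
      unfold PySem.Chars.rstrip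
      rw [htake, List.reverse_append]
      simp [hsp]
    · rw [if_neg (by rw [hgetD]; exact hsp)]
      unfold PySem.Chars.rstrip
      rw [htake, List.reverse_append]
      simp [hsp]

lemma pvSign_nonempty {sg : String} (h : sg ≠ "") : 0 < sg.toList.length := by
  by_contra hc
  have : sg.toList = [] := by
    cases hl : sg.toList with
    | nil => rfl
    | cons a l => rw [hl] at hc; simp at hc
  exact h (by
    have := congrArg String.ofList this
    simpa using this)

lemma pvSign_sim (t : List Char) (sg : String) (hsg : sg ≠ "") (L : Nat) (b : Bool)
    (hL : L ≤ t.length) :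
    pvSignStepA (t.take L, b) sg
      = (t.take (pvSignStepB t (L, b) sg).1, (pvSignStepB t (L, b) sg).2)
      ∧ (pvSignStepB t (L, b) sg).1 ≤ t.length := by
  have hk : 0 < sg.toList.length := pvSign_nonempty hsg
  have hlenL : (t.take L).length = L := by simp [Nat.min_eq_left hL]
  unfold pvSignStepA pvSignStepB
  by_cases he : PySem.Chars.endswith (t.take L) sg.toList
  · rw [if_pos he, if_pos he]
    have hlen : (PySem.Str.len sg : Int) = (sg.toList.length : Int) := by
      simp [PySem.Str.len_eq]
    constructor
    · simp only
      rw [hlen, PySem.List.slice_to_neg_natCast _ _ hk, hlenL, List.take_take,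
        Nat.min_eq_left (by omega)]
      rw [pvRstrip_take t (L - sg.toList.length) (by omega)]
    · exact le_trans (pvRstripLen_le t _) (by omega)
  · rw [if_neg he, if_neg he]
    exact ⟨rfl, hL⟩

lemma pvSignFold (t : List Char) (signs : List String) (h : ∀ sg ∈ signs, sg ≠ "") :
    ∀ (L : Nat) (b : Bool), L ≤ t.length →
    signs.foldl pvSignStepA (t.take L, b)
      = (t.take (signs.foldl (pvSignStepB t) (L, b)).1, (signs.foldl (pvSignStepB t) (L, b)).2)
      ∧ (signs.foldl (pvSignStepB t) (L, b)).1 ≤ t.length := by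
  induction signs with
  | nil => intro L b hL; exact ⟨rfl, hL⟩
  | cons sg rest ih =>
    intro L b hL
    have h1 := pvSign_sim t sg (h sg (by simp)) L b hL
    simp only [List.foldl_cons]
    rw [h1.1]
    have := ih (fun x hx => h x (by simp [hx])) (pvSignStepB t (L, b) sg).1
      (pvSignStepB t (L, b) sg).2 h1.2
    simpa using this

lemma pvBr_sim (t : List Char) (rup : Bool) (L : Nat) (hL : L ≤ t.length) :
    pvBrA rup (t.take L)
      = (t.take (pvBrB t (pvFP t.length (pvScanB 0 t ([], []))) rup L).1,
         (pvBrB t (pvFP t.length (pvScanB 0 t ([], []))) rup L).2)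
      ∧ (pvBrB t (pvFP t.length (pvScanB 0 t ([], []))) rup L).1 ≤ t.length := by
  have hlen : (t.take L).length = L := by simp [Nat.min_eq_left hL]
  have hinv := pvScanB_inv (t.take L) 0 [] [] (by simp) (by simp) (by simp)
  rw [hlen] at hinv
  unfold pvBrA pvBrB
  by_cases hrup : rup
  · rw [if_pos hrup, if_pos hrup, pvMax t L hL, pvScanA_eq]
    cases hS : (pvScanB 0 (t.take L) ([], [])).2.getLast? with
    | none => simp [pvCastS, List.getLast?_map, hS, hL]
    | some top =>
      have htopmem : top ∈ (pvScanB 0 (t.take L) ([], [])).2 := by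
        have hne : (pvScanB 0 (t.take L) ([], [])).2 ≠ [] := by
          intro hh; rw [hh] at hS; simp at hS
        have := List.getLast?_eq_some_getLast hne
        rw [hS] at this
        rw [Option.some.inj this]
        exact List.getLast_mem hne
      have htlt : top.2 < L := by simpa using hinv.2.1 top htopmem
      have hcast : (pvCastS (pvScanB 0 (t.take L) ([], [])).2).getLast?
          = some (top.1, (top.2 : Int)) := by
        simp [pvCastS, List.getLast?_map, hS]
      rw [hcast]
      simp only [Option.map_some]
      refine ⟨?_, le_trans (pvRstripLen_le t _) (by omega)⟩
      rw [PySem.List.slice_to_natCast, List.take_take, Nat.min_eq_left (by omega),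
        pvRstrip_take t top.2 (by omega)]
  · rw [if_neg hrup, if_neg hrup]
    exact ⟨rfl, hL⟩

lemma pvLoop_sim (t : List Char) (rup : Bool) (signs : List String)
    (h : ∀ sg ∈ signs, sg ≠ "") :
    ∀ (fuel : Nat) (L : Nat), L ≤ t.length →
    pvLoopA rup signs fuel (t.take L)
      = t.take (pvLoopB t (pvFP t.length (pvScanB 0 t ([], []))) rup signs fuel L) := by
  intro fuel
  induction fuel with
  | zero => intro L hL; simp [pvLoopA, pvLoopB]
  | succ fuel ih =>
    intro L hL
    have hb := pvBr_sim t rup L hL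
    have hf := pvSignFold t signs h
      (pvBrB t (pvFP t.length (pvScanB 0 t ([], []))) rup L).1
      (pvBrB t (pvFP t.length (pvScanB 0 t ([], []))) rup L).2 hb.2
    simp only [pvLoopA, pvLoopB]
    rw [hb.1, hf.1]
    simp only [Prod.mk.eta]
    by_cases hfin : (signs.foldl (pvSignStepB t)
        (pvBrB t (pvFP t.length (pvScanB 0 t ([], []))) rup L)).2
    · rw [if_pos hfin, if_pos hfin]
      exact ih _ (by simpa using hf.2)
    · rw [if_neg hfin, if_neg hfin]

-- ===== VERDICT (by name: the statement is the Claim_ definition above) =====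
theorem extract_work_name_post_process_py_spec : Claim_equal_extract_work_name_post_process_py := by
  unfold Claim_equal_extract_work_name_post_process_py
  intro s rup signs hdom hpre
  unfold Spec_extract_work_name_post_process_py
  have hsg : ∀ sg ∈ signs, sg ≠ "" := fun sg hm he => hpre (he ▸ hm)
  have key := pvLoop_sim (PySem.Chars.strip s.toList) rup signs hsg
    ((PySem.Chars.strip s.toList).length + 1) (PySem.Chars.strip s.toList).length le_rfl
  rw [List.take_length] at key
  exact congrArg String.ofList key
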